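-- pv_equiv track=rewrite | github.com/Phynnnix/binary-sudoku-solver | main.py | existsInSudoku
-- ===== SOURCE A (Python) =====
-- def existsInSudoku(line, rowcol, sudoku):
--     lines = list(range(len(sudoku)))
--     newLines = []
--     for u in range(len(line)):
--         if (rowcol == "row"):
--             for r in lines:
--                 if line[u] == sudoku[u][r]:
--                     newLines.append(r)
--         if (rowcol == "col"):
--             for c in lines:
--                 if line[u] == sudoku[c][u]:
--                     newLines.append(c)
--         lines = newLines
--         newLines = []
--         if len(lines) == 0: return False
--     return True
-- ===== SOURCE B (Python) =====
-- def existsInSudoku(line, rowcol, sudoku):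
--     if not line:
--         return True
--     if rowcol == "row":
--         return any(all(line[u] == sudoku[u][r] for u in range(len(line)))
--                    for r in range(len(sudoku)))
--     if rowcol == "col":
--         return any(all(line[u] == sudoku[r][u] for u in range(len(line)))
--                    for r in range(len(sudoku)))
--     return False
-- ===== Notes on version B (the rewrite author's own statement) =====
-- stated objective: simpler
-- what changed: A filters a shrinking candidate-index list position by position; B independently verifies each candidate index with a single any/all over positions and returns on the first full match.
-- outside the precondition, e.g. on existsInSudoku([1, 9], 'row', [[1, 2], [3]]): A returns False, B returns False
import Mathlib
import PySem

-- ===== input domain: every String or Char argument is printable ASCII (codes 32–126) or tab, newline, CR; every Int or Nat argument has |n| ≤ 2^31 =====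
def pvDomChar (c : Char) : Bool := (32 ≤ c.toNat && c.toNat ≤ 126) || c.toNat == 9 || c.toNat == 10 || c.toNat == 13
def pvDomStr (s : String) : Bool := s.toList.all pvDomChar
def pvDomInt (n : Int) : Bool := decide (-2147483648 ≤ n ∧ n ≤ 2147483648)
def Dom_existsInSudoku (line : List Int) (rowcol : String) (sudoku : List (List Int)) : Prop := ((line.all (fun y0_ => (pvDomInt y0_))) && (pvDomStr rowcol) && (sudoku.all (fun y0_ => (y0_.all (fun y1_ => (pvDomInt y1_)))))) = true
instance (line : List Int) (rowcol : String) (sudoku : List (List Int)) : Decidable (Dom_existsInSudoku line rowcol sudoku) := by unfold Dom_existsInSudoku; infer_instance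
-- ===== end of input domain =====

-- B verifies each candidate index independently with one any/all pass instead of A's
-- shrinking-candidate filtering; objective: simpler. Pre_ excludes ragged/undersized
-- grids on which A's position-by-position scan can raise IndexError.


-- ===== PORT A =====
-- the for-u loop of A, with early 'return False'; lines is the surviving candidate list
def pvLoopA (line : List Int) (rowcol : String) (sudoku : List (List Int)) :
    List Int → List Int → Bool
  | [], _lines => true
  | u :: us, lines =>
    let n1 : List Int :=
      if rowcol = "row" then
        lines.foldl (fun acc r =>
          if PySem.List.pyGetD line u 0 = PySem.List.pyGetD (PySem.List.pyGetD sudoku u []) r 0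
          then acc ++ [r] else acc) []
      else []
    let n2 : List Int :=
      if rowcol = "col" then
        lines.foldl (fun acc c =>
          if PySem.List.pyGetD line u 0 = PySem.List.pyGetD (PySem.List.pyGetD sudoku c []) u 0
          then acc ++ [c] else acc) n1
      else n1
    if n2.length = 0 then false else pvLoopA line rowcol sudoku us n2

def existsInSudoku (line : List Int) (rowcol : String) (sudoku : List (List Int)) : Bool :=
  pvLoopA line rowcol sudoku (PySem.List.pyRange 0 line.length 1)
    (PySem.List.pyRange 0 sudoku.length 1)

-- ===== PORT B =====
def existsInSudoku_alt (line : List Int) (rowcol : String) (sudoku : List (List Int)) : Bool :=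
  if line = [] then true
  else if rowcol = "row" then
    (List.range sudoku.length).any (fun r =>
      (List.range line.length).all (fun u =>
        decide (PySem.List.pyGetD line (u : Int) 0
          = PySem.List.pyGetD (PySem.List.pyGetD sudoku (u : Int) []) (r : Int) 0)))
  else if rowcol = "col" then
    (List.range sudoku.length).any (fun r =>
      (List.range line.length).all (fun u =>
        decide (PySem.List.pyGetD line (u : Int) 0
          = PySem.List.pyGetD (PySem.List.pyGetD sudoku (r : Int) []) (u : Int) 0)))
  else false

-- ===== PRECONDITION & SPEC =====
-- Pre_ excludes ragged/undersized grids, on which A can raise IndexError; on such grids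
-- where A happens to return before hitting a bad index, B returns the same value anyway.
def Pre_existsInSudoku (line : List Int) (rowcol : String) (sudoku : List (List Int)) : Prop :=
  line = [] ∨ (rowcol ≠ "row" ∧ rowcol ≠ "col") ∨
  (rowcol = "row" ∧ line.length ≤ sudoku.length ∧
    ∀ row ∈ sudoku.take line.length, sudoku.length ≤ row.length) ∨
  (rowcol = "col" ∧ ∀ row ∈ sudoku, line.length ≤ row.length)
instance (line : List Int) (rowcol : String) (sudoku : List (List Int)) : Decidable (Pre_existsInSudoku line rowcol sudoku) := by unfold Pre_existsInSudoku; infer_instance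

def pvWitness_existsInSudoku : List Int × String × List (List Int) :=
  ([1, 2], "row", [[1, 3], [2, 4]])

def Spec_existsInSudoku (line : List Int) (rowcol : String) (sudoku : List (List Int)) (out : Bool) : Prop := out = existsInSudoku_alt line rowcol sudoku
instance (line : List Int) (rowcol : String) (sudoku : List (List Int)) (out : Bool) : Decidable (Spec_existsInSudoku line rowcol sudoku out) := by unfold Spec_existsInSudoku; infer_instance

-- ===== CLAIM (what is proved, stated in full; the proofs are below) =====
def Claim_equal_existsInSudoku : Prop := ∀ (line : List Int) (rowcol : String) (sudoku : List (List Int)), Dom_existsInSudoku line rowcol sudoku → Pre_existsInSudoku line rowcol sudoku → Spec_existsInSudoku line rowcol sudoku (existsInSudoku line rowcol sudoku)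

-- ===== LEMMAS AND PROOFS =====

-- generic shape of A's loop: filter the candidates by the step-u test, stop on empty
def pvFilterLoop (cond : Int → Int → Bool) : List Int → List Int → Bool
  | [], _ => true
  | u :: us, lines =>
    let n2 := lines.filter (cond u)
    if n2 = [] then false else pvFilterLoop cond us n2

-- candidate r passes every step v < k
def pvPb (cond : Int → Int → Bool) (k r : Int) : Bool :=
  (PySem.List.pyRange 0 k 1).all (fun v => cond v r)

lemma pvPb_iff (cond : Int → Int → Bool) (k r : Int) :
    pvPb cond k r = true ↔ ∀ v : Int, 0 ≤ v → v < k → cond v r = true := by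
  simp only [pvPb, List.all_eq_true, PySem.List.mem_pyRange_one]
  exact ⟨fun h v h0 h1 => h v ⟨h0, h1⟩, fun h v hv => h v hv.1 hv.2⟩

lemma pvLoopA_row (line : List Int) (sudoku : List (List Int)) (us lines : List Int) :
    pvLoopA line "row" sudoku us lines =
    pvFilterLoop (fun u r =>
      decide (PySem.List.pyGetD line u 0
        = PySem.List.pyGetD (PySem.List.pyGetD sudoku u []) r 0)) us lines := by
  induction us generalizing lines with
  | nil => rfl
  | cons u us ih =>
    simp only [pvLoopA, pvFilterLoop, PySem.List.foldl_append_ite_eq_filter, List.nil_append,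
      String.reduceEq, reduceIte, List.length_eq_zero_iff]
    split_ifs with h <;> simp [ih]

lemma pvLoopA_col (line : List Int) (sudoku : List (List Int)) (us lines : List Int) :
    pvLoopA line "col" sudoku us lines =
    pvFilterLoop (fun u r =>
      decide (PySem.List.pyGetD line u 0
        = PySem.List.pyGetD (PySem.List.pyGetD sudoku r []) u 0)) us lines := by
  induction us generalizing lines with
  | nil => rfl
  | cons u us ih =>
    simp only [pvLoopA, pvFilterLoop, PySem.List.foldl_append_ite_eq_filter, List.nil_append,
      String.reduceEq, reduceIte, List.length_eq_zero_iff]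
    split_ifs with h <;> simp [ih]

lemma pvPb_succ (cond : Int → Int → Bool) (k r : Int) (h0 : 0 ≤ k) :
    pvPb cond (k + 1) r = (pvPb cond k r && cond k r) := by
  unfold pvPb
  rw [PySem.List.pyRange_one_succ_right h0, List.all_append]
  simp

lemma pvFilterLoop_spec (cond : Int → Int → Bool) (n len : Int) :
    ∀ (d : Nat) (k : Int), 0 ≤ k → k < len → (len - k).toNat = d →
    pvFilterLoop cond (PySem.List.pyRange k len 1)
      ((PySem.List.pyRange 0 n 1).filter (pvPb cond k))
    = (PySem.List.pyRange 0 n 1).any (pvPb cond len) := by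
  intro d
  induction d with
  | zero => intro k h0 hk hd; omega
  | succ d ih =>
    intro k h0 hk hd
    rw [PySem.List.pyRange_one_cons hk, pvFilterLoop]
    have hcomb : ((PySem.List.pyRange 0 n 1).filter (pvPb cond k)).filter (cond k)
        = (PySem.List.pyRange 0 n 1).filter (pvPb cond (k + 1)) := by
      rw [List.filter_filter]
      apply List.filter_congr
      intro r _
      rw [pvPb_succ cond k r h0, Bool.and_comm]
    simp only [hcomb]
    split_ifs with hemp
    · symm
      rw [List.any_eq_false]
      intro r hrm hrp
      have hk1 : pvPb cond (k + 1) r = true := by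
        rw [pvPb_iff] at hrp ⊢
        intro v hv0 hv1; exact hrp v hv0 (by omega)
      have : r ∈ (PySem.List.pyRange 0 n 1).filter (pvPb cond (k + 1)) :=
        List.mem_filter.2 ⟨hrm, hk1⟩
      rw [hemp] at this; exact absurd this (List.not_mem_nil)
    · rcases lt_or_eq_of_le (by omega : k + 1 ≤ len) with h | h
      · exact ih (k + 1) (by omega) h (by omega)
      · rw [h, PySem.List.pyRange_one_eq_nil (le_refl len), pvFilterLoop]
        symm
        rw [List.any_eq_true]
        obtain ⟨r, hr⟩ := List.exists_mem_of_ne_nil _ hemp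
        rw [List.mem_filter] at hr
        exact ⟨r, hr.1, h ▸ hr.2⟩

-- bridge from the Int-indexed any/all to B's Nat-indexed any/all
lemma pvAny_cast (cond : Int → Int → Bool) (n len : Nat) :
    (PySem.List.pyRange 0 (n : Int) 1).any (pvPb cond (len : Int))
    = (List.range n).any (fun r => (List.range len).all (fun u => cond (u : Int) (r : Int))) := by
  rw [Bool.eq_iff_iff]
  simp only [List.any_eq_true, List.all_eq_true, List.mem_range, PySem.List.mem_pyRange_one,
    pvPb_iff]
  constructor
  · rintro ⟨r, ⟨hr0, hrn⟩, hp⟩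
    refine ⟨r.toNat, by omega, fun u hu => ?_⟩
    have := hp (u : Int) (by omega) (by omega)
    rwa [Int.toNat_of_nonneg hr0]
  · rintro ⟨r, hrn, hall⟩
    refine ⟨(r : Int), ⟨by omega, by omega⟩, fun v hv0 hv1 => ?_⟩
    have := hall v.toNat (by omega)
    rwa [Int.toNat_of_nonneg hv0] at this

lemma pvFilter_true (n : Int) (cond : Int → Int → Bool) :
    (PySem.List.pyRange 0 n 1).filter (pvPb cond 0) = PySem.List.pyRange 0 n 1 := by
  apply List.filter_eq_self.2
  intro r _
  rw [pvPb_iff]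
  intro v hv0 hv1; omega

-- ===== VERDICT (by name: the statement is the Claim_ definition above) =====
theorem existsInSudoku_spec : Claim_equal_existsInSudoku := by
  intro line rowcol sudoku _dom _pre
  unfold Spec_existsInSudoku existsInSudoku existsInSudoku_alt
  cases line with
  | nil =>
    simp [PySem.List.pyRange_one_eq_nil (le_refl (0 : Int)), pvLoopA]
  | cons l ls =>
    have hlen : (0 : Int) < (((l :: ls).length : Nat) : Int) := by
      simp
    rw [if_neg (List.cons_ne_nil l ls)]
    by_cases hrow : rowcol = "row"
    · subst hrow
      rw [if_pos rfl, pvLoopA_row, ← pvFilter_true ((sudoku.length : Nat) : Int),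
        pvFilterLoop_spec _ _ _ ((((l :: ls).length : Nat) : Int) - 0).toNat 0 (le_refl 0) hlen rfl,
        pvAny_cast]
    · rw [if_neg hrow]
      by_cases hcol : rowcol = "col"
      · subst hcol
        rw [if_pos rfl, pvLoopA_col, ← pvFilter_true ((sudoku.length : Nat) : Int),
          pvFilterLoop_spec _ _ _ ((((l :: ls).length : Nat) : Int) - 0).toNat 0 (le_refl 0) hlen rfl,
          pvAny_cast]
      · rw [if_neg hcol, PySem.List.pyRange_one_cons hlen]
        simp [pvLoopA, hrow, hcol]
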